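-- pv_equiv track=rewrite | github.com/aws/aws-sam-cli | samcli/commands/init/interactive_event_bridge_flow.py | _construct_cli_page
-- ===== SOURCE A (Python) =====
-- def _construct_cli_page(items, item_per_page):
--     """Responsible for splitting items into CLI pages.
--     Currently CLI pages are list of dictionary [0:{0:s1, 1:s2: 3:s3}, 1: {4:s4, 5:s5: 6:s6}]
--     We maintain the page detail and item index details."""
--     pages = [
--         items[i * item_per_page : (i + 1) * item_per_page]
--         for i in range((len(items) + item_per_page - 1) // item_per_page)
--     ]
--     index = 0
--     schema_dict = dict()
--     for page in pages:
--         schema_dict.update({index: page})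
--         index = index + 1
--
--     return schema_dict
-- ===== SOURCE B (Python) =====
-- def _construct_cli_page(items, item_per_page):
--     n_pages = (len(items) + item_per_page - 1) // item_per_page
--     schema_dict = {i: [] for i in range(n_pages)}
--     for idx, item in enumerate(items):
--         schema_dict[idx // item_per_page].append(item)
--     return schema_dict
-- ===== Notes on version B (the rewrite author's own statement) =====
-- stated objective: alternative
-- what changed: B pre-initialises one empty bucket per page and scatters each item into bucket idx // item_per_page in a single enumerate pass, instead of A's list comprehension of contiguous slices followed by a dict-update loop.
-- outside the precondition, e.g. on _construct_cli_page(['a'], -1): A returns {0: []}, B returns {0: ['a']}; on _construct_cli_page(['a', 'b'], -1): A returns {}, B raises KeyError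
import Mathlib
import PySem

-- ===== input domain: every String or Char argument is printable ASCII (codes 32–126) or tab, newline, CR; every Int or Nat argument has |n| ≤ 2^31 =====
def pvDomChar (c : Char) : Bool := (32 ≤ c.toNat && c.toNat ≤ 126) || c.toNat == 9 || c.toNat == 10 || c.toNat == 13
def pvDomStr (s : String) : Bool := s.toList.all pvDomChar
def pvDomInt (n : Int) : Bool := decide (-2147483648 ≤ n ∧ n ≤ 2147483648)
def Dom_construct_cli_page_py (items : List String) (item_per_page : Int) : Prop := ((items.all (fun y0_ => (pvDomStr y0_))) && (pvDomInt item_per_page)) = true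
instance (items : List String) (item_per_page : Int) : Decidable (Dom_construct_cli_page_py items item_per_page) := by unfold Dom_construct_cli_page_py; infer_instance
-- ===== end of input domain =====

-- B re-implements A's slice-per-page pagination by scattering each item into a
-- pre-initialised page bucket in one enumerate pass; same return value on the
-- stated domain (no speed claim).

-- ===== PORT A =====
def construct_cli_page_py (items : List String) (item_per_page : Int) : List (Int × List String) :=
  -- pages = [items[i*ipp : (i+1)*ipp] for i in range((len(items)+ipp-1)//ipp)]
  let pages : List (List String) :=
    (PySem.List.pyRange 0
        (PySem.Int.floordiv ((items.length : Int) + item_per_page - 1) item_per_page)).map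
      (fun i => PySem.List.slice items (some (i * item_per_page)) (some ((i + 1) * item_per_page)))
  -- index = 0; schema_dict = {}; for page in pages: schema_dict.update({index: page}); index += 1
  (pages.foldl
    (fun (st : PySem.Dict Int (List String) × Int) page => (st.1.insert st.2 page, st.2 + 1))
    (PySem.Dict.empty, 0)).1.items

-- ===== PORT B =====
def construct_cli_page_py_alt (items : List String) (item_per_page : Int) : List (Int × List String) :=
  -- n_pages = (len(items) + item_per_page - 1) // item_per_page
  let n_pages := PySem.Int.floordiv ((items.length : Int) + item_per_page - 1) item_per_page
  -- schema_dict = {i: [] for i in range(n_pages)}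
  let schema0 : PySem.Dict Int (List String) :=
    (PySem.List.pyRange 0 n_pages).foldl (fun d i => d.insert i ([] : List String)) PySem.Dict.empty
  -- for idx, item in enumerate(items): schema_dict[idx // item_per_page].append(item)
  -- (under Pre_ the indexed key always exists, so Dict.modify with default [] is exact)
  ((PySem.List.enumerate items).foldl
    (fun d p => d.modify (PySem.Int.floordiv p.1 item_per_page) [] (fun v => v ++ [p.2]))
    schema0).items

-- ===== PRECONDITION & SPEC =====
-- Pre_ keeps the natural page-size domain item_per_page ≥ 1: at item_per_page = 0 both
-- programs raise ZeroDivisionError, and for item_per_page < 0 (not a page size) A's values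
-- ({} or dicts of empty pages) are floor-division artefacts on which B's bucketing raises
-- KeyError or buckets the items.
def Pre_construct_cli_page_py (items : List String) (item_per_page : Int) : Prop :=
  1 ≤ item_per_page
instance (items : List String) (item_per_page : Int) : Decidable (Pre_construct_cli_page_py items item_per_page) := by unfold Pre_construct_cli_page_py; infer_instance

def pvWitness_construct_cli_page_py : List String × Int := (["a", "b", "c"], 2)

def Spec_construct_cli_page_py (items : List String) (item_per_page : Int) (out : List (Int × List String)) : Prop := out = construct_cli_page_py_alt items item_per_page
instance (items : List String) (item_per_page : Int) (out : List (Int × List String)) : Decidable (Spec_construct_cli_page_py items item_per_page out) := by unfold Spec_construct_cli_page_py; infer_instance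

-- ===== CLAIM (what is proved, stated in full; the proofs are below) =====
def Claim_equal_construct_cli_page_py : Prop := ∀ (items : List String) (item_per_page : Int), Dom_construct_cli_page_py items item_per_page → Pre_construct_cli_page_py items item_per_page → Spec_construct_cli_page_py items item_per_page (construct_cli_page_py items item_per_page)

-- ===== LEMMAS AND PROOFS =====

-- A's update loop: starting from a dict whose keys are all below k, it appends (k, p0), (k+1, p1), …
lemma pv_foldA_items (ps : List (List String)) :
    ∀ (d : PySem.Dict Int (List String)) (k : Int), (∀ j ∈ d.keys, j < k) →
      ((ps.foldl (fun (st : PySem.Dict Int (List String) × Int) page =>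
          (st.1.insert st.2 page, st.2 + 1)) (d, k)).1.items)
        = d.items ++ PySem.List.enumerate ps k := by
  induction ps with
  | nil => intro d k _; simp [PySem.List.enumerate_nil]
  | cons p ps ih =>
    intro d k h
    have hc : d.contains k = false := by
      rw [PySem.Dict.contains_eq_decide_mem_keys]
      simp only [decide_eq_false_iff_not]
      intro hk; exact absurd (h k hk) (lt_irrefl k)
    rw [List.foldl_cons, ih (d.insert k p) (k + 1) (by
      rw [PySem.Dict.keys_insert_of_not_contains d p hc]
      intro j hj
      rcases List.mem_append.mp hj with hj | hj
      · exact lt_trans (h j hj) (by omega)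
      · simp at hj; omega)]
    rw [PySem.Dict.items_insert_of_not_contains d p hc, PySem.List.enumerate_cons]
    simp

-- B's dict-comprehension loop: inserting fresh keys appends the pairs in order.
lemma pv_foldB0_items (L : List Int) :
    ∀ (d : PySem.Dict Int (List String)), (∀ i ∈ L, i ∉ d.keys) → L.Nodup →
      (L.foldl (fun d i => d.insert i ([] : List String)) d).items
        = d.items ++ L.map (fun i => (i, ([] : List String))) := by
  induction L with
  | nil => intro d _ _; simp
  | cons i L ih =>
    intro d hmem hnd
    have hc : d.contains i = false := by
      rw [PySem.Dict.contains_eq_decide_mem_keys]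
      simp only [decide_eq_false_iff_not]
      exact hmem i (by simp)
    rw [List.foldl_cons, ih (d.insert i ([] : List String)) (by
        intro j hj
        rw [PySem.Dict.keys_insert_of_not_contains d _ hc]
        intro hjk
        rcases List.mem_append.mp hjk with hjk | hjk
        · exact hmem j (by simp [hj]) hjk
        · simp at hjk; subst hjk; exact (List.nodup_cons.mp hnd).1 hj)
      (List.nodup_cons.mp hnd).2]
    rw [PySem.Dict.items_insert_of_not_contains d _ hc]
    simp

-- B's append loop never adds a key when every touched key is already present.
lemma pv_foldM_keys (l : List (Int × String)) :
    ∀ (d : PySem.Dict Int (List String)), (∀ p ∈ l, p.1 ∈ d.keys) →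
      (l.foldl (fun d p => d.modify p.1 [] (fun v => v ++ [p.2])) d).keys = d.keys := by
  induction l with
  | nil => intro d _; simp
  | cons p l ih =>
    intro d hmem
    have hc : d.contains p.1 = true := by
      rw [PySem.Dict.contains_eq_decide_mem_keys]
      simp only [decide_eq_true_eq]
      exact hmem p (by simp)
    have hk : (d.modify p.1 [] (fun v => v ++ [p.2])).keys = d.keys := by
      rw [PySem.Dict.keys_modify, PySem.Dict.keys_insert_of_contains _ _ hc]
    rw [List.foldl_cons, ih _ (by intro q hq; rw [hk]; exact hmem q (by simp [hq]))]
    exact hk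

-- enumerate indices lie in [s, s + len).
lemma pv_mem_enumerate_bounds {α : Type} (xs : List α) :
    ∀ (s : Int) (p : Int × α), p ∈ PySem.List.enumerate xs s →
      s ≤ p.1 ∧ p.1 < s + xs.length := by
  induction xs with
  | nil => intro s p hp; rw [PySem.List.enumerate_nil] at hp; cases hp
  | cons x xs ih =>
    intro s p hp
    rw [PySem.List.enumerate_cons] at hp
    rcases List.mem_cons.mp hp with hp | hp
    · subst hp
      simp only [List.length_cons]
      constructor
      · exact le_refl _
      · push_cast; omega
    · have := ih (s + 1) p hp
      simp only [List.length_cons]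
      push_cast
      omega

-- the items whose index falls in the window [a, b) are a contiguous drop/take.
lemma pv_filter_enumerate_window {α : Type} (a b : Int) (xs : List α) :
    ∀ s : Int,
      ((PySem.List.enumerate xs s).filter (fun p => decide (a ≤ p.1 ∧ p.1 < b))).map
          (fun p => p.2)
        = (xs.drop (a - s).toNat).take (b - max a s).toNat := by
  induction xs with
  | nil => intro s; simp [PySem.List.enumerate_nil]
  | cons x xs ih =>
    intro s
    rw [PySem.List.enumerate_cons]
    by_cases hs : a ≤ s
    · have hmax : max a s = s := by omega
      have ht : (a - s).toNat = 0 := by omega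
      by_cases hb : s < b
      · have hdec : decide (a ≤ s ∧ s < b) = true := by simp; omega
        simp only [List.filter_cons, hdec, if_true, List.map_cons, ih (s + 1)]
        have h1 : (a - (s + 1)).toNat = 0 := by omega
        have h2 : max a (s + 1) = s + 1 := by omega
        have h3 : (b - s).toNat = (b - (s + 1)).toNat + 1 := by omega
        rw [h1, h2, hmax, ht, h3]
        simp [List.take_succ_cons]
      · have hdec : decide (a ≤ s ∧ s < b) = false := by simp; omega
        simp only [List.filter_cons, hdec, Bool.false_eq_true, if_false, ih (s + 1)]
        have h1 : (b - max a (s + 1)).toNat = 0 := by omega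
        have h2 : (b - max a s).toNat = 0 := by omega
        rw [h1, h2, List.take_zero, List.take_zero]
    · have hdec : decide (a ≤ s ∧ s < b) = false := by simp; omega
      simp only [List.filter_cons, hdec, Bool.false_eq_true, if_false, ih (s + 1)]
      have h1 : max a (s + 1) = a := by omega
      have h2 : max a s = a := by omega
      have h3 : (a - s).toNat = (a - (s + 1)).toNat + 1 := by omega
      rw [h1, h2, h3, List.drop_succ_cons]

-- enumerating a map over range pairs index j with f j.
lemma pv_enumerate_map_range {α : Type} (f : Nat → α) (t : Nat) :
    ∀ (s : Int),
      PySem.List.enumerate ((List.range t).map f) s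
        = (List.range t).map (fun (j : Nat) => ((s + (j : Int) : Int), f j)) := by
  induction t with
  | zero => intro s; simp [PySem.List.enumerate_nil]
  | succ t ih =>
    intro s
    rw [List.range_succ, List.map_append, PySem.List.enumerate_append, ih, List.map_append]
    simp [PySem.List.enumerate_cons, PySem.List.enumerate_nil]

-- with nodup keys, the items list is the keys list paired with the looked-up values.
lemma pv_map_getD_items (l : List (Int × List String)) :
    (l.map (fun p => p.1)).Nodup →
      l.map (fun p => (p.1, (PySem.Dict.mk l).getD p.1 ([] : List String))) = l := by
  induction l with
  | nil => intro _; simp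
  | cons q l ih =>
    intro hnd
    rw [List.map_cons] at hnd
    obtain ⟨hq, hl⟩ := List.nodup_cons.mp hnd
    rw [List.map_cons]
    have hhead : (PySem.Dict.mk (q :: l)).getD q.1 ([] : List String) = q.2 := by
      simp [PySem.Dict.getD, PySem.Dict.get?, List.find?]
    have htail : ∀ p ∈ l,
        (PySem.Dict.mk (q :: l)).getD p.1 ([] : List String)
          = (PySem.Dict.mk l).getD p.1 ([] : List String) := by
      intro p hp
      have hne : (q.1 == p.1) = false := by
        refine beq_eq_false_iff_ne.mpr ?_
        intro he
        exact hq (by rw [he]; exact List.mem_map_of_mem hp)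
      simp [PySem.Dict.getD, PySem.Dict.get?, List.find?, hne]
    rw [List.map_congr_left (fun p hp => by rw [htail p hp]), ih hl, hhead]

-- ===== VERDICT (by name: the statement is the Claim_ definition above) =====
theorem construct_cli_page_py_spec : Claim_equal_construct_cli_page_py := by
  intro items m _ hpre
  have hm : (0 : Int) < m := hpre
  unfold Spec_construct_cli_page_py construct_cli_page_py construct_cli_page_py_alt
  dsimp only
  set P : Int := PySem.Int.floordiv ((items.length : Int) + m - 1) m with hPdef
  have hbr := (PySem.Int.floordiv_eq_iff_of_pos hm).mp hPdef.symm
  have hP0 : 0 ≤ P := (PySem.Int.le_floordiv_iff_mul_le hm).mpr (by nlinarith)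
  have hnP : (items.length : Int) ≤ P * m := by nlinarith [hbr.2]
  -- A's loop appends (0, page0), (1, page1), …
  rw [pv_foldA_items _ PySem.Dict.empty 0 (by simp [PySem.Dict.keys_empty])]
  -- B's dict comprehension
  set d0 : PySem.Dict Int (List String) :=
    (PySem.List.pyRange 0 P).foldl (fun d i => d.insert i ([] : List String)) PySem.Dict.empty
    with hd0def
  have hd0items : d0.items = (PySem.List.pyRange 0 P).map (fun i => (i, ([] : List String))) := by
    rw [hd0def, pv_foldB0_items _ PySem.Dict.empty
      (by intro i _; simp [PySem.Dict.keys_empty]) (PySem.List.nodup_pyRange_one 0 P)]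
    simp [PySem.Dict.empty]
  have hd0keys : d0.keys = PySem.List.pyRange 0 P := by
    show d0.items.map (fun p => p.1) = _
    rw [hd0items, List.map_map]
    simp [Function.comp_def]
  -- B's scatter loop, as a fold over mapped pairs
  set g : Int × String → Int × String := fun q => (PySem.Int.floordiv q.1 m, q.2) with hgdef
  have hfold :
      (PySem.List.enumerate items).foldl
          (fun d p => d.modify (PySem.Int.floordiv p.1 m) [] (fun v => v ++ [p.2])) d0
        = ((PySem.List.enumerate items).map g).foldl
            (fun d p => d.modify p.1 [] (fun v => v ++ [p.2])) d0 := by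
    rw [List.foldl_map]
  rw [hfold]
  set E : List (Int × String) := (PySem.List.enumerate items).map g with hEdef
  have hEkey : ∀ p ∈ E, p.1 ∈ d0.keys := by
    intro p hp
    obtain ⟨q, hq, rfl⟩ := List.mem_map.mp hp
    have hb := pv_mem_enumerate_bounds items 0 q hq
    rw [hd0keys, PySem.List.mem_pyRange_one]
    constructor
    · exact (PySem.Int.le_floordiv_iff_mul_le hm).mpr (by simpa using hb.1)
    · exact (PySem.Int.floordiv_lt_iff_lt_mul hm).mpr (by omega)
  set d1 : PySem.Dict Int (List String) :=
    E.foldl (fun d p => d.modify p.1 [] (fun v => v ++ [p.2])) d0 with hd1def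
  have hd1keys : d1.keys = PySem.List.pyRange 0 P := by
    rw [hd1def, pv_foldM_keys E d0 hEkey, hd0keys]
  have hnodup : (d1.items.map (fun p => p.1)).Nodup := by
    show d1.keys.Nodup
    rw [hd1keys]; exact PySem.List.nodup_pyRange_one 0 P
  have hitems : d1.items = (PySem.List.pyRange 0 P).map (fun k => (k, d1.getD k [])) := by
    conv_rhs => rw [← hd1keys]
    show _ = (d1.items.map (fun p => p.1)).map _
    rw [List.map_map]
    exact (pv_map_getD_items d1.items hnodup).symm
  have hgetD : ∀ k, k ∈ PySem.List.pyRange 0 P →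
      d1.getD k [] = (E.filter (fun p => p.1 == k)).map (fun p => p.2) := by
    intro k hk
    rw [hd1def, PySem.Dict.getD_foldl_modify_append E d0 k,
      PySem.Dict.getD_of_mem_items d0
        (by rw [hd0items]; exact List.mem_map_of_mem hk)
        (by rw [hd0keys]; exact PySem.List.nodup_pyRange_one 0 P)]
    simp
  have hmapeq : (PySem.List.pyRange 0 P).map (fun k => (k, d1.getD k []))
      = (PySem.List.pyRange 0 P).map
          (fun k => (k, (E.filter (fun p => p.1 == k)).map (fun p => p.2))) :=
    List.map_congr_left (fun k hk => by rw [hgetD k hk])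
  rw [show (PySem.Dict.empty : PySem.Dict Int (List String)).items = [] from rfl,
    List.nil_append, hitems, hmapeq]
  -- both sides are maps over range(P)
  rw [PySem.List.pyRange_one 0 P]
  simp only [sub_zero, zero_add, List.map_map]
  rw [pv_enumerate_map_range]
  apply List.map_congr_left
  intro j hj
  simp only [Function.comp_apply, zero_add, Prod.mk.injEq, true_and]
  -- bucket j of B is the j-th contiguous slice of A
  have hc0 : (0 : Int) ≤ (j : Int) * m := mul_nonneg (Int.natCast_nonneg j) hm.le
  rw [hEdef, List.filter_map, List.map_map]
  have hsnd : ((fun (p : Int × String) => p.2) ∘ g) = fun (q : Int × String) => q.2 := by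
    funext q; simp [hgdef]
  have hpred : ∀ q ∈ PySem.List.enumerate items,
      ((fun (p : Int × String) => p.1 == (j : Int)) ∘ g) q
        = (fun (q : Int × String) => decide ((j : Int) * m ≤ q.1 ∧ q.1 < ((j : Int) + 1) * m)) q := by
    intro q _
    simp only [Function.comp_apply, hgdef]
    rw [Bool.eq_iff_iff]
    simp only [beq_iff_eq, decide_eq_true_eq]
    exact PySem.Int.floordiv_eq_iff_of_pos hm
  rw [hsnd, List.filter_congr hpred,
    pv_filter_enumerate_window ((j : Int) * m) (((j : Int) + 1) * m) items 0,
    PySem.List.slice_toNat items hc0 (mul_nonneg (by positivity) hm.le)]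
  have hring : ((j : Int) + 1) * m = (j : Int) * m + m := by ring
  have e1 : (((j : Int) + 1) * m).toNat - ((j : Int) * m).toNat
      = ((((j : Int) + 1) * m) - max ((j : Int) * m) 0).toNat := by
    rw [hring]; omega
  have e2 : ((j : Int) * m - 0).toNat = ((j : Int) * m).toNat := by omega
  rw [e1, e2]
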